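-- pv_equiv track=rewrite | github.com/sunovivid/DeepGaze | scanpath_visualize.py | filter_overlapping_points
-- ===== SOURCE A (Python) =====
-- def filter_overlapping_points(xs, ys, min_sep):
--     kept = []
--     for idx, (x, y) in enumerate(zip(xs, ys), start=1):
--         if not kept:
--             kept.append(idx)
--             continue
--         keep = True
--         for kept_idx in kept:
--             dx = xs[kept_idx - 1] - x
--             dy = ys[kept_idx - 1] - y
--             if (dx * dx + dy * dy) < (min_sep * min_sep):
--                 keep = False
--                 break
--         if keep:
--             kept.append(idx)
--     return set(kept)
-- ===== SOURCE B (Python) =====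
-- def filter_overlapping_points(xs, ys, min_sep):
--     # Spatial-hash re-implementation: bucket kept points into a uniform grid of
--     # cell size s = |min_sep| and test each new point only against the 3x3
--     # neighbourhood of its cell (any conflicting kept point must lie there).
--     s = abs(min_sep)
--     n = min(len(xs), len(ys))
--     if s == 0:
--         # distance**2 < 0 never holds: every point is kept
--         return set(range(1, n + 1))
--     grid = {}
--     kept = []
--     for idx in range(1, n + 1):
--         x = xs[idx - 1]
--         y = ys[idx - 1]
--         cx = x // s
--         cy = y // s
--         cells = [(cx + dx, cy + dy) for dx in (-1, 0, 1) for dy in (-1, 0, 1)]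
--         conflict = any(
--             (px - x) * (px - x) + (py - y) * (py - y) < s * s
--             for cell in cells
--             for (px, py) in grid.get(cell, [])
--         )
--         if not conflict:
--             kept.append(idx)
--             grid.setdefault((cx, cy), []).append((x, y))
--     return set(kept)
-- ===== Notes on version B (the rewrite author's own statement) =====
-- stated objective: faster
-- what changed: Replaced A's inner linear scan over all previously kept points by a uniform spatial hash grid with cell size |min_sep|: each new point is tested only against kept points stored in the 3x3 neighbourhood of its cell, which is exhaustive because any point closer than min_sep lies in an adjacent cell.
import Mathlib
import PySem

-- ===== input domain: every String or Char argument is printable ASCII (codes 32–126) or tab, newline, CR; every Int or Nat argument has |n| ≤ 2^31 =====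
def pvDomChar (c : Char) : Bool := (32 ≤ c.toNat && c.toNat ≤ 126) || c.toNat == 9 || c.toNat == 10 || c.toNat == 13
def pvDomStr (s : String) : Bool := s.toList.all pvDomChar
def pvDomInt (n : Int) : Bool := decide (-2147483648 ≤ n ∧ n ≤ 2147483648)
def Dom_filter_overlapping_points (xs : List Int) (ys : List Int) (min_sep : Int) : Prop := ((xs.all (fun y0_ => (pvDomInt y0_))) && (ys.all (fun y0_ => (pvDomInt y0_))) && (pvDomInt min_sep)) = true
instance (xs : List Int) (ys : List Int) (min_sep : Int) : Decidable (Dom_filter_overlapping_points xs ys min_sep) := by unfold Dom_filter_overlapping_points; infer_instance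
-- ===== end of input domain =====

-- B replaces A's quadratic all-kept scan by a uniform spatial-hash grid (cell size |min_sep|,
-- only the 3x3 neighbourhood is checked); proved to return exactly A's value on all inputs.


-- ===== PORT A =====
-- inner 'for kept_idx in kept' loop with its break: computes the flag 'keep'.
-- kept_idx - 1 is always a valid nonnegative index here (kept holds enumerate
-- indices, 1 ≤ kept_idx ≤ len), so pyGetD with default 0 is exact.
def pvAKeep (xs ys : List Int) (x y min_sep : Int) : List Int → Bool
  | [] => true
  | k :: rest =>
    let dx := PySem.List.pyGetD xs (k - 1) 0 - x
    let dy := PySem.List.pyGetD ys (k - 1) 0 - y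
    if dx * dx + dy * dy < min_sep * min_sep then false
    else pvAKeep xs ys x y min_sep rest

def pvALoop (xs ys : List Int) (min_sep : Int) : List (Int × (Int × Int)) → List Int → List Int
  | [], kept => kept
  | (idx, xy) :: rest, kept =>
    if kept.isEmpty then pvALoop xs ys min_sep rest (kept ++ [idx])
    else if pvAKeep xs ys xy.1 xy.2 min_sep kept then pvALoop xs ys min_sep rest (kept ++ [idx])
    else pvALoop xs ys min_sep rest kept

def filter_overlapping_points (xs : List Int) (ys : List Int) (min_sep : Int) : List Int :=
  PySem.Set.ofList (pvALoop xs ys min_sep (PySem.List.enumerate (xs.zip ys) 1) [])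

-- ===== PORT B =====
-- the comprehension [(cx+dx, cy+dy) for dx in (-1,0,1) for dy in (-1,0,1)]
def pvBCells (cx cy : Int) : List (Int × Int) :=
  ([-1, 0, 1] : List Int).flatMap (fun dx => ([-1, 0, 1] : List Int).map (fun dy => (cx + dx, cy + dy)))

-- the any(...) generator over cells and the bucket grid.get(cell, [])
def pvBConflict (grid : PySem.Dict (Int × Int) (List (Int × Int))) (s x y : Int)
    (cells : List (Int × Int)) : Bool :=
  cells.any (fun c => (grid.getD c []).any (fun p =>
    (p.1 - x) * (p.1 - x) + (p.2 - y) * (p.2 - y) < s * s))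

-- grid.setdefault((cx,cy),[]).append((x,y))  ==  insert the extended bucket (overwrite keeps position)
def pvBLoop (xs ys : List Int) (s : Int) :
    List Int → PySem.Dict (Int × Int) (List (Int × Int)) → List Int → List Int
  | [], _, kept => kept
  | idx :: rest, grid, kept =>
    let x := PySem.List.pyGetD xs (idx - 1) 0
    let y := PySem.List.pyGetD ys (idx - 1) 0
    let cx := PySem.Int.floordiv x s
    let cy := PySem.Int.floordiv y s
    if pvBConflict grid s x y (pvBCells cx cy) then
      pvBLoop xs ys s rest grid kept
    else
      pvBLoop xs ys s rest (grid.insert (cx, cy) (grid.getD (cx, cy) [] ++ [(x, y)])) (kept ++ [idx])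

def filter_overlapping_points_alt (xs : List Int) (ys : List Int) (min_sep : Int) : List Int :=
  let s := |min_sep|
  let n : Int := min (xs.length : Int) (ys.length : Int)
  if s = 0 then PySem.Set.ofList (PySem.List.pyRange 1 (n + 1) 1)
  else PySem.Set.ofList (pvBLoop xs ys s (PySem.List.pyRange 1 (n + 1) 1) PySem.Dict.empty [])

-- ===== PRECONDITION & SPEC =====
def Spec_filter_overlapping_points (xs : List Int) (ys : List Int) (min_sep : Int) (out : List Int) : Prop := out = filter_overlapping_points_alt xs ys min_sep
instance (xs : List Int) (ys : List Int) (min_sep : Int) (out : List Int) : Decidable (Spec_filter_overlapping_points xs ys min_sep out) := by unfold Spec_filter_overlapping_points; infer_instance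

-- ===== CLAIM (what is proved, stated in full; the proofs are below) =====
def Claim_equal_filter_overlapping_points : Prop := ∀ (xs : List Int) (ys : List Int) (min_sep : Int), Dom_filter_overlapping_points xs ys min_sep → Spec_filter_overlapping_points xs ys min_sep (filter_overlapping_points xs ys min_sep)

-- ===== LEMMAS AND PROOFS =====

-- the point at 1-based index k, as both loops read it
def pvPt (xs ys : List Int) (k : Int) : Int × Int :=
  (PySem.List.pyGetD xs (k - 1) 0, PySem.List.pyGetD ys (k - 1) 0)

def pvCell (s : Int) (p : Int × Int) : Int × Int :=
  (PySem.Int.floordiv p.1 s, PySem.Int.floordiv p.2 s)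

-- grid invariant: buckets hold exactly the kept points, each filed under its own cell
def pvInv (xs ys : List Int) (s : Int) (grid : PySem.Dict (Int × Int) (List (Int × Int)))
    (kept : List Int) : Prop :=
  (∀ c p, p ∈ grid.getD c [] → pvCell s p = c ∧ ∃ k ∈ kept, pvPt xs ys k = p) ∧
  (∀ k ∈ kept, pvPt xs ys k ∈ grid.getD (pvCell s (pvPt xs ys k)) [])

-- unfolding equations (definitional)
lemma pvALoop_cons (xs ys : List Int) (ms idx : Int) (xy : Int × Int)
    (rest : List (Int × (Int × Int))) (kept : List Int) :
    pvALoop xs ys ms ((idx, xy) :: rest) kept =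
      if kept.isEmpty then pvALoop xs ys ms rest (kept ++ [idx])
      else if pvAKeep xs ys xy.1 xy.2 ms kept then pvALoop xs ys ms rest (kept ++ [idx])
      else pvALoop xs ys ms rest kept := rfl

lemma pvAKeep_cons (xs ys : List Int) (x y ms k : Int) (rest : List Int) :
    pvAKeep xs ys x y ms (k :: rest) =
      if (PySem.List.pyGetD xs (k - 1) 0 - x) * (PySem.List.pyGetD xs (k - 1) 0 - x) +
         (PySem.List.pyGetD ys (k - 1) 0 - y) * (PySem.List.pyGetD ys (k - 1) 0 - y) < ms * ms
      then false else pvAKeep xs ys x y ms rest := rfl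

lemma pvBLoop_cons (xs ys : List Int) (s idx : Int) (rest : List Int)
    (grid : PySem.Dict (Int × Int) (List (Int × Int))) (kept : List Int) :
    pvBLoop xs ys s (idx :: rest) grid kept =
      if pvBConflict grid s (pvPt xs ys idx).1 (pvPt xs ys idx).2
          (pvBCells (pvCell s (pvPt xs ys idx)).1 (pvCell s (pvPt xs ys idx)).2) then
        pvBLoop xs ys s rest grid kept
      else
        pvBLoop xs ys s rest
          (grid.insert (pvCell s (pvPt xs ys idx))
            (grid.getD (pvCell s (pvPt xs ys idx)) [] ++ [pvPt xs ys idx]))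
          (kept ++ [idx]) := rfl

lemma pvAlt_eq (xs ys : List Int) (ms : Int) :
    filter_overlapping_points_alt xs ys ms =
      if |ms| = 0 then
        PySem.Set.ofList
          (PySem.List.pyRange 1 (min (xs.length : Int) (ys.length : Int) + 1) 1)
      else
        PySem.Set.ofList
          (pvBLoop xs ys |ms|
            (PySem.List.pyRange 1 (min (xs.length : Int) (ys.length : Int) + 1) 1)
            PySem.Dict.empty []) := rfl

lemma pvAKeep_eq_true_iff (xs ys : List Int) (x y ms : Int) (kept : List Int) :
    pvAKeep xs ys x y ms kept = true ↔
      ∀ k ∈ kept,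
        ¬ ((PySem.List.pyGetD xs (k - 1) 0 - x) * (PySem.List.pyGetD xs (k - 1) 0 - x) +
           (PySem.List.pyGetD ys (k - 1) 0 - y) * (PySem.List.pyGetD ys (k - 1) 0 - y) < ms * ms) := by
  induction kept with
  | nil => simp [pvAKeep]
  | cons k rest ih =>
    rw [pvAKeep_cons]
    split_ifs with h
    · simp only [false_iff]
      intro hall
      exact hall k (List.mem_cons_self) h
    · simp only [ih, List.mem_cons]
      constructor
      · rintro hall k' (rfl | hk')
        · exact h
        · exact hall k' hk'
      · intro hall k' hk'
        exact hall k' (Or.inr hk')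

lemma pvMem_cells (cx cy : Int) (c : Int × Int) :
    c ∈ pvBCells cx cy ↔ cx - 1 ≤ c.1 ∧ c.1 ≤ cx + 1 ∧ cy - 1 ≤ c.2 ∧ c.2 ≤ cy + 1 := by
  obtain ⟨a, b⟩ := c
  simp [pvBCells, Prod.ext_iff]
  omega

lemma pvAbsLt (u v s : Int) (hs : 0 < s) (h : u * u + v * v < s * s) : -s < u ∧ u < s := by
  constructor <;> nlinarith [mul_self_nonneg u, mul_self_nonneg v, sq_nonneg (u - s), sq_nonneg (u + s)]

lemma pvFdivClose (s a b : Int) (hs : 0 < s) (h1 : a - b < s) (h2 : b - a < s) :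
    PySem.Int.floordiv b s - 1 ≤ PySem.Int.floordiv a s ∧
      PySem.Int.floordiv a s ≤ PySem.Int.floordiv b s + 1 := by
  have ha := PySem.Int.floordiv_mul_add_mod a s
  have hb := PySem.Int.floordiv_mul_add_mod b s
  have ra0 : 0 ≤ PySem.Int.mod a s := PySem.Int.mod_nonneg a hs
  have ra1 : PySem.Int.mod a s < s := PySem.Int.mod_lt a hs
  have rb0 : 0 ≤ PySem.Int.mod b s := PySem.Int.mod_nonneg b hs
  have rb1 : PySem.Int.mod b s < s := PySem.Int.mod_lt b hs
  constructor
  · by_contra hlt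
    push Not at hlt
    have hq : PySem.Int.floordiv a s + 2 ≤ PySem.Int.floordiv b s := by omega
    have := mul_le_mul_of_nonneg_right hq (le_of_lt hs)
    nlinarith
  · by_contra hlt
    push Not at hlt
    have hq : PySem.Int.floordiv b s + 2 ≤ PySem.Int.floordiv a s := by omega
    have := mul_le_mul_of_nonneg_right hq (le_of_lt hs)
    nlinarith

lemma pvBConflict_iff (xs ys : List Int) (s x y : Int)
    (grid : PySem.Dict (Int × Int) (List (Int × Int))) (kept : List Int) (hs : 0 < s)
    (hinv : pvInv xs ys s grid kept) :
    pvBConflict grid s x y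
        (pvBCells (PySem.Int.floordiv x s) (PySem.Int.floordiv y s)) = true ↔
      ∃ k ∈ kept,
        (PySem.List.pyGetD xs (k - 1) 0 - x) * (PySem.List.pyGetD xs (k - 1) 0 - x) +
        (PySem.List.pyGetD ys (k - 1) 0 - y) * (PySem.List.pyGetD ys (k - 1) 0 - y) < s * s := by
  obtain ⟨h1, h2⟩ := hinv
  rw [pvBConflict, List.any_eq_true]
  constructor
  · rintro ⟨c, _, hc⟩
    rw [List.any_eq_true] at hc
    obtain ⟨p, hp, hlt⟩ := hc
    obtain ⟨-, k, hk, hpk⟩ := h1 c p hp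
    rw [← hpk] at hlt
    simp only [pvPt, decide_eq_true_eq] at hlt
    exact ⟨k, hk, hlt⟩
  · rintro ⟨k, hk, hlt⟩
    have hmem := h2 k hk
    refine ⟨pvCell s (pvPt xs ys k), ?_, ?_⟩
    · rw [pvMem_cells]
      have hx := pvAbsLt _ _ s hs hlt
      have hy := pvAbsLt (PySem.List.pyGetD ys (k - 1) 0 - y) (PySem.List.pyGetD xs (k - 1) 0 - x) s hs (by linarith)
      have cx := pvFdivClose s (PySem.List.pyGetD xs (k - 1) 0) x hs (by omega) (by omega)
      have cy := pvFdivClose s (PySem.List.pyGetD ys (k - 1) 0) y hs (by omega) (by omega)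
      simp only [pvCell, pvPt]
      exact ⟨cx.1, cx.2, cy.1, cy.2⟩
    · rw [List.any_eq_true]
      exact ⟨pvPt xs ys k, hmem, by simpa [pvPt] using hlt⟩

lemma pvInv_empty (xs ys : List Int) (s : Int) :
    pvInv xs ys s PySem.Dict.empty [] := by
  constructor
  · intro c p hp
    simp [PySem.Dict.getD_empty] at hp
  · intro k hk
    simp at hk

lemma pvInv_insert (xs ys : List Int) (s : Int)
    (grid : PySem.Dict (Int × Int) (List (Int × Int))) (kept : List Int) (idx : Int)
    (hinv : pvInv xs ys s grid kept) :
    pvInv xs ys s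
      (grid.insert (pvCell s (pvPt xs ys idx))
        (grid.getD (pvCell s (pvPt xs ys idx)) [] ++ [pvPt xs ys idx]))
      (kept ++ [idx]) := by
  obtain ⟨h1, h2⟩ := hinv
  constructor
  · intro c p hp
    rw [PySem.Dict.getD_insert] at hp
    by_cases hc : c = pvCell s (pvPt xs ys idx)
    · rw [if_pos hc] at hp
      rcases List.mem_append.mp hp with hp | hp
      · obtain ⟨hcell, k, hk, hpk⟩ := h1 _ p hp
        exact ⟨by rw [hcell, hc], k, List.mem_append_left _ hk, hpk⟩
      · simp only [List.mem_singleton] at hp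
        subst hp
        exact ⟨hc.symm, idx, by simp, rfl⟩
    · rw [if_neg hc] at hp
      obtain ⟨hcell, k, hk, hpk⟩ := h1 c p hp
      exact ⟨hcell, k, List.mem_append_left _ hk, hpk⟩
  · intro k hk
    rw [PySem.Dict.getD_insert]
    rcases List.mem_append.mp hk with hk | hk
    · have hmem := h2 k hk
      by_cases hc : pvCell s (pvPt xs ys k) = pvCell s (pvPt xs ys idx)
      · rw [if_pos hc]
        exact List.mem_append_left _ (by rw [← hc]; exact hmem)
      · rw [if_neg hc]
        exact hmem
    · simp only [List.mem_singleton] at hk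
      subst hk
      rw [if_pos rfl]
      exact List.mem_append_right _ (by simp)

lemma pvLoop_eq (xs ys : List Int) (ms s : Int) (hs : 0 < s) (hss : s * s = ms * ms) :
    ∀ (L : List Int) (grid : PySem.Dict (Int × Int) (List (Int × Int))) (kept : List Int),
      pvInv xs ys s grid kept →
      pvALoop xs ys ms (L.map (fun i => (i, pvPt xs ys i))) kept = pvBLoop xs ys s L grid kept := by
  intro L
  induction L with
  | nil => intro grid kept _; rfl
  | cons idx rest ih =>
    intro grid kept hinv
    have hconf := pvBConflict_iff xs ys s (pvPt xs ys idx).1 (pvPt xs ys idx).2 grid kept hs hinv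
    rw [List.map_cons, pvALoop_cons, pvBLoop_cons]
    by_cases hc : pvBConflict grid s (pvPt xs ys idx).1 (pvPt xs ys idx).2
        (pvBCells (pvCell s (pvPt xs ys idx)).1 (pvCell s (pvPt xs ys idx)).2) = true
    · obtain ⟨k, hk, hlt⟩ := hconf.mp hc
      have hkeep : pvAKeep xs ys (pvPt xs ys idx).1 (pvPt xs ys idx).2 ms kept = false := by
        rw [← Bool.not_eq_true, pvAKeep_eq_true_iff]
        push Not
        exact ⟨k, hk, by rwa [← hss]⟩
      have hne : ¬ (kept.isEmpty = true) := by
        cases kept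
        · simp at hk
        · simp
      rw [if_pos hc, if_neg hne, if_neg (by simp [hkeep])]
      exact ih grid kept hinv
    · have hkeep : pvAKeep xs ys (pvPt xs ys idx).1 (pvPt xs ys idx).2 ms kept = true := by
        rw [pvAKeep_eq_true_iff]
        intro k hk hlt
        exact hc (hconf.mpr ⟨k, hk, by rwa [hss]⟩)
      rw [if_neg hc, hkeep]
      have hstep := pvInv_insert xs ys s grid kept idx hinv
      split_ifs with h1 h2
      · exact ih _ _ hstep
      · exact ih _ _ hstep
      · exact absurd rfl h2

lemma pvAKeep_zero (xs ys : List Int) (x y : Int) (kept : List Int) :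
    pvAKeep xs ys x y 0 kept = true := by
  induction kept with
  | nil => rfl
  | cons k rest ih =>
    rw [pvAKeep_cons, if_neg, ih]
    intro h
    nlinarith [mul_self_nonneg (PySem.List.pyGetD xs (k - 1) 0 - x),
      mul_self_nonneg (PySem.List.pyGetD ys (k - 1) 0 - y)]

lemma pvALoop_zero (xs ys : List Int) :
    ∀ (E : List (Int × (Int × Int))) (kept : List Int),
      pvALoop xs ys 0 E kept = kept ++ E.map (·.1) := by
  intro E
  induction E with
  | nil => intro kept; simp [pvALoop]
  | cons p rest ih =>
    intro kept
    obtain ⟨idx, xy⟩ := p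
    rw [pvALoop_cons, pvAKeep_zero]
    split_ifs with h1 h2
    · simp [ih]
    · simp [ih]
    · exact absurd rfl h2

lemma pvEnum_eq (xs ys : List Int) :
    PySem.List.enumerate (xs.zip ys) 1 =
      (PySem.List.pyRange 1 (min (xs.length : Int) (ys.length : Int) + 1) 1).map
        (fun i => (i, pvPt xs ys i)) := by
  apply List.ext_getElem
  · simp [PySem.List.length_enumerate, PySem.List.length_pyRange_one, List.length_zip]
    omega
  · intro k h1 h2
    have hk : k < min xs.length ys.length := by
      simpa [PySem.List.length_enumerate, List.length_zip] using h1
    rw [PySem.List.getElem_enumerate, List.getElem_map, PySem.List.getElem_pyRange_one]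
    have hx : (1 : Int) + (k : Int) - 1 = (k : Int) := by ring
    simp only [pvPt, hx, PySem.List.pyGetD_natCast]
    rw [List.getElem_zip]
    refine Prod.ext rfl (Prod.ext ?_ ?_) <;> simp
    · exact (List.getD_eq_getElem xs 0 (by omega)).symm
    · exact (List.getD_eq_getElem ys 0 (by omega)).symm

-- ===== VERDICT (by name: the statement is the Claim_ definition above) =====
theorem filter_overlapping_points_spec : Claim_equal_filter_overlapping_points := by
  intro xs ys ms _
  show filter_overlapping_points xs ys ms = filter_overlapping_points_alt xs ys ms
  rw [pvAlt_eq]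
  by_cases hms : ms = 0
  · subst hms
    rw [if_pos (abs_zero), filter_overlapping_points, pvALoop_zero, List.nil_append,
      PySem.List.map_fst_enumerate]
    congr 1
    congr 1
    simp [List.length_zip]
    omega
  · rw [if_neg (fun h => hms (abs_eq_zero.mp h)), filter_overlapping_points, pvEnum_eq]
    congr 1
    exact pvLoop_eq xs ys ms |ms| (abs_pos.mpr hms) (abs_mul_abs_self ms) _ _ _ (pvInv_empty xs ys |ms|)
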